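-- pv_equiv track=rewrite | github.com/bjbhwcm/JoshWooCrawler | PicCrawler.py | get_pic_suffix
-- ===== SOURCE A (Python) =====
-- pic_suffix = [".jpg",".png",".jpeg",".JPG",".JPEG",".PNG",".gif",".GIF",]
--
-- def get_pic_suffix(s):
--     n = len(s) - 1
--     res = ""
--     flag = False
--     for i in range(n + 1):
--         res = res + s[n]
--         if s[n] == ".":
--             flag = True
--             break
--         n = n - 1
--     if flag:
--         suffix = res[::-1]
--         if suffix in pic_suffix:
--             return suffix
--         else:
--             return None
--     else:
--         return None
-- ===== SOURCE B (Python) =====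
-- pic_suffix = [".jpg",".png",".jpeg",".JPG",".JPEG",".PNG",".gif",".GIF",]
--
-- def get_pic_suffix(s):
--     for p in pic_suffix:
--         if s.endswith(p):
--             return p
--     return None
-- ===== Notes on version B (the rewrite author's own statement) =====
-- stated objective: faster
-- what changed: B drops A's backward character-by-character scan for the last dot (and the string reversal and membership test) and instead probes the string with each of the eight known extensions via s.endswith(p), returning the first match; it inspects only the last few characters.
import Mathlib
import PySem

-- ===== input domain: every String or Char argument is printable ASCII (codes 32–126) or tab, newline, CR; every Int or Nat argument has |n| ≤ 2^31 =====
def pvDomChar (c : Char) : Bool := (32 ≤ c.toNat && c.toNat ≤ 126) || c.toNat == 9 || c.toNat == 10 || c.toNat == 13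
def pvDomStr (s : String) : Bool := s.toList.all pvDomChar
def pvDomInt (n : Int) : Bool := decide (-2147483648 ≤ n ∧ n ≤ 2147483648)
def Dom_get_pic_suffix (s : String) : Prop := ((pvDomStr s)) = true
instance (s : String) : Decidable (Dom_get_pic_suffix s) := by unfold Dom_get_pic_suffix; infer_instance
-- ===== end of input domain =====

-- B probes the string with each known candidate extension via endswith instead of scanning
-- backward for the last dot and testing membership; it reads only the last few characters (objective: faster, measured).

-- ===== PORT A =====
-- module constant pic_suffix (shared by both versions in Python)
def pic_suffix : List String := [".jpg", ".png", ".jpeg", ".JPG", ".JPEG", ".PNG", ".gif", ".GIF"]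

-- the 'for i in range(n + 1)' loop of A: fuel = number of remaining iterations, n decreasing index
def pvLoopA (cs : List Char) (fuel : Nat) (n : Int) (res : List Char) : List Char × Bool :=
  match fuel with
  | 0 => (res, false)
  | f + 1 =>
    let c := PySem.List.pyGetD cs n ' '   -- s[n]; n is always in range when the body runs
    let res' := res ++ [c]                -- res = res + s[n]
    if c = '.' then (res', true)          -- flag = True; break
    else pvLoopA cs f (n - 1) res'        -- n = n - 1

def get_pic_suffix (s : String) : Option String :=
  let cs := s.toList
  let n : Int := PySem.List.len cs - 1
  let rf := pvLoopA cs (n + 1).toNat n []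
  if rf.2 then
    let suffix := String.ofList rf.1.reverse   -- res[::-1] is the reverse (PySem.List.slice?_none_none_neg_one)
    if suffix ∈ pic_suffix then some suffix else none
  else none

-- ===== PORT B =====
def get_pic_suffix_alt (s : String) : Option String :=
  pic_suffix.find? (fun p => PySem.Str.endswith s p)   -- first candidate p with s.endswith(p), else None

-- ===== PRECONDITION & SPEC =====
def Spec_get_pic_suffix (s : String) (out : Option String) : Prop := out = get_pic_suffix_alt s
instance (s : String) (out : Option String) : Decidable (Spec_get_pic_suffix s out) := by unfold Spec_get_pic_suffix; infer_instance

-- ===== CLAIM (what is proved, stated in full; the proofs are below) =====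
def Claim_equal_get_pic_suffix : Prop := ∀ (s : String), Dom_get_pic_suffix s → Spec_get_pic_suffix s (get_pic_suffix s)

-- ===== LEMMAS AND PROOFS =====

-- proof-side view of A's backward scan, structured on the reversed character list
def pvScanRev : List Char → List Char × Bool
  | [] => ([], false)
  | c :: t => if c = '.' then ([c], true) else (c :: (pvScanRev t).1, (pvScanRev t).2)

-- the Bool predicate 'is not a dot'
def pvP : Char → Bool := fun c => c ≠ '.'

lemma pvLoopA_eq_scanRev : ∀ (r v acc : List Char),
    pvLoopA (r.reverse ++ v) r.length ((r.length : Int) - 1) acc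
      = (acc ++ (pvScanRev r).1, (pvScanRev r).2) := by
  intro r
  induction r with
  | nil => intro v acc; simp [pvLoopA, pvScanRev]
  | cons c t ih =>
    intro v acc
    have hrev : (c :: t).reverse ++ v = t.reverse ++ (c :: v) := by simp
    have hlen : (c :: t).length = t.length + 1 := rfl
    rw [hrev, hlen]
    have hidx : ((t.length + 1 : Nat) : Int) - 1 = (t.length : Int) := by push_cast; ring
    rw [pvLoopA, hidx]
    have hget : PySem.List.pyGetD (t.reverse ++ c :: v) (t.length : Int) ' ' = c := by
      simp [PySem.List.pyGetD_natCast]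
    rw [hget]
    by_cases hc : c = '.'
    · simp [hc, pvScanRev]
    · rw [if_neg hc, ih (c :: v) (acc ++ [c])]
      simp [pvScanRev, hc]

lemma pvScanRev_spec (r : List Char) :
    pvScanRev r = if '.' ∈ r then (r.takeWhile pvP ++ ['.'], true) else (r, false) := by
  induction r with
  | nil => simp [pvScanRev]
  | cons c t ih =>
    by_cases hc : c = '.'
    · subst hc; simp [pvScanRev, pvP]
    · have hc' : pvP c = true := by simp [pvP, hc]
      by_cases hm : '.' ∈ t
      · simp [pvScanRev, hc, ih, hm, hc', Ne.symm hc]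
      · simp [pvScanRev, hc, ih, hm, Ne.symm hc]

lemma pvTakeWhile_dot (u rest : List Char) (hu : '.' ∉ u) :
    (u ++ '.' :: rest).takeWhile pvP = u := by
  rw [List.takeWhile_append_of_pos]
  · simp [pvP]
  · intro x hx; simp [pvP]; rintro rfl; exact hu hx

lemma pvPref_iff (r body : List Char) (hb : '.' ∉ body) (hdot : '.' ∈ r) :
    (body ++ ['.'] <+: r) ↔ r.takeWhile pvP = body := by
  constructor
  · rintro ⟨rest, h⟩
    rw [← h]
    simpa using pvTakeWhile_dot body rest hb
  · intro h
    have hdw : r.dropWhile pvP ≠ [] := by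
      intro hnil
      have := List.takeWhile_append_dropWhile (p := pvP) (l := r)
      rw [hnil, List.append_nil, h] at this
      exact hb (this ▸ hdot)
    have hhead := List.head_dropWhile_not pvP hdw
    have hh : (r.dropWhile pvP).head hdw = '.' := by
      simpa [pvP] using hhead
    have hcons : r.dropWhile pvP = '.' :: (r.dropWhile pvP).tail := by
      rw [← hh]; exact (List.cons_head_tail hdw).symm
    refine ⟨(r.dropWhile pvP).tail, ?_⟩
    calc body ++ ['.'] ++ (r.dropWhile pvP).tail
        = r.takeWhile pvP ++ r.dropWhile pvP := by rw [h, hcons]; simp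
      _ = r := List.takeWhile_append_dropWhile

-- per-candidate condition: s.endswith(p) iff the backward scan up to the dot equals p's body
lemma pvCand_cond (s p : String) (hdot : '.' ∈ s.toList.reverse)
    (hsplit : p.toList.reverse = p.toList.reverse.dropLast ++ ['.'])
    (hnb : '.' ∉ p.toList.reverse.dropLast) :
    PySem.Str.endswith s p
      = decide (s.toList.reverse.takeWhile pvP = p.toList.reverse.dropLast) := by
  have h1 : PySem.Str.endswith s p = true ↔ p.toList <:+ s.toList := by
    simp [PySem.Chars.endswith_iff]
  have h3 := pvPref_iff s.toList.reverse p.toList.reverse.dropLast hnb hdot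
  have hiff : PySem.Str.endswith s p = true
      ↔ s.toList.reverse.takeWhile pvP = p.toList.reverse.dropLast := by
    rw [h1, ← List.reverse_prefix]
    constructor
    · intro h; rw [hsplit] at h; exact h3.mp h
    · intro h; rw [hsplit]; exact h3.mpr h
  by_cases hP : s.toList.reverse.takeWhile pvP = p.toList.reverse.dropLast
  · rw [hiff.mpr hP]; simp [hP]
  · have hb : PySem.Str.endswith s p = false := by
      cases hbe : PySem.Str.endswith s p with
      | false => rfl
      | true => exact absurd (hiff.mp hbe) hP
    rw [hb]; symm; exact decide_eq_false hP

lemma pvKey (s : String) (w : List Char) (hdot : '.' ∈ s.toList.reverse)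
    (hw : w = s.toList.reverse.takeWhile pvP) :
    ∀ pl : List String,
      (∀ p ∈ pl, p.toList.reverse = p.toList.reverse.dropLast ++ ['.']
          ∧ '.' ∉ p.toList.reverse.dropLast) →
      (if String.ofList ('.' :: w.reverse) ∈ pl then some (String.ofList ('.' :: w.reverse)) else none)
        = pl.find? (fun p => PySem.Str.endswith s p) := by
  intro pl
  induction pl with
  | nil => intro _; simp
  | cons a t ih =>
    intro hall
    obtain ⟨hsplit, hnb⟩ := hall a (by simp)
    have hcond := pvCand_cond s a hdot hsplit hnb
    by_cases hc : w = a.toList.reverse.dropLast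
    · have hend : PySem.Str.endswith s a = true := by
        rw [hcond]; exact decide_eq_true (hw.symm.trans hc)
      have hxa : String.ofList ('.' :: w.reverse) = a := by
        have ha : a.toList = '.' :: w.reverse := by
          have := congrArg List.reverse hsplit
          simpa [hc] using this
        rw [← ha, String.ofList_toList]
      rw [List.find?_cons_of_pos hend]
      have hmem : String.ofList ('.' :: w.reverse) ∈ a :: t := by
        rw [hxa]; exact List.mem_cons_self
      rw [if_pos hmem, hxa]
    · have hend : PySem.Str.endswith s a = false := by
        rw [hcond]; exact decide_eq_false (fun h => hc (hw.trans h))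
      have hxa : String.ofList ('.' :: w.reverse) ≠ a := by
        intro h
        apply hc
        have ha : a.toList = '.' :: w.reverse := by
          rw [← h, String.toList_ofList]
        have : a.toList.reverse.dropLast = w := by
          rw [ha]; simp
        exact this.symm
      rw [List.find?_cons_of_neg (by simp only [Bool.not_eq_true]; exact hend)]
      have hmem : (String.ofList ('.' :: w.reverse) ∈ a :: t)
          ↔ (String.ofList ('.' :: w.reverse) ∈ t) := by
        simp [List.mem_cons, hxa]
      rw [if_congr hmem rfl rfl]
      exact ih (fun p hp => hall p (by simp [hp]))

-- A reduced to the scan view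
lemma pvA_eq (s : String) :
    get_pic_suffix s
      = (if (pvScanRev s.toList.reverse).2 then
          (if String.ofList (pvScanRev s.toList.reverse).1.reverse ∈ pic_suffix
            then some (String.ofList (pvScanRev s.toList.reverse).1.reverse) else none)
          else none) := by
  have h := pvLoopA_eq_scanRev s.toList.reverse [] []
  simp at h
  unfold get_pic_suffix
  simp [PySem.List.len_eq, h]

-- ===== VERDICT (by name: the statement is the Claim_ definition above) =====
theorem get_pic_suffix_spec : Claim_equal_get_pic_suffix := by
  intro s _
  unfold Spec_get_pic_suffix get_pic_suffix_alt
  rw [pvA_eq]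
  by_cases hdot : '.' ∈ s.toList.reverse
  · rw [pvScanRev_spec]
    simp only [hdot, if_pos, List.reverse_append]
    have h5 : ['.'].reverse ++ (s.toList.reverse.takeWhile pvP).reverse
        = '.' :: (s.toList.reverse.takeWhile pvP).reverse := by simp
    rw [h5]
    exact pvKey s _ hdot rfl pic_suffix (by decide)
  · rw [pvScanRev_spec]
    simp only [hdot, Bool.false_eq_true, if_false]
    symm
    apply List.find?_eq_none.mpr
    intro p hp
    simp only [Bool.not_eq_true]
    rcases Bool.eq_false_or_eq_true (PySem.Str.endswith s p) with hb | hb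
    · exfalso
      have hsuf : p.toList <:+ s.toList := by
        simpa [PySem.Chars.endswith_iff] using hb
      have hdp : '.' ∈ p.toList := by
        fin_cases hp <;> decide
      exact hdot (by simpa using List.IsSuffix.mem hdp hsuf)
    · exact hb
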